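-- pv_equiv track=rewrite | github.com/Shavss/Software-Lab | src/data_preprocessing.py | count_line_counts
-- ===== SOURCE A (Python) =====
-- def count_line_counts(target):
--     """
--     @brief Counts the number of files for each line count.
--
--     This function creates a dictionary mapping the number of lines to the count of files
--     having that many lines.
--
--     @param target (list): List of dictionaries containing grouped and padded line data.
--
--     @return dict: Dictionary with number of lines as keys and file counts as values.
--     """
--     line_count_dict = {}
--
--     for entry in target:
--         num_lines = entry[1]
--         if num_lines in line_count_dict:
--             line_count_dict[num_lines] += 1
--         else:
--             line_count_dict[num_lines] = 1
--
--     return line_count_dict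
-- ===== SOURCE B (Python) =====
-- def count_line_counts(target):
--     """Same result as A, by ordered dedup of the line-count values then counting each."""
--     vals = [entry[1] for entry in target]
--     return {v: vals.count(v) for v in dict.fromkeys(vals)}
-- ===== Notes on version B (the rewrite author's own statement) =====
-- stated objective: simpler
-- what changed: Replaced the hash-accumulation loop (membership test + increment-or-insert per entry) by an ordered dedup of the line-count values followed by a count of each distinct value.
import Mathlib
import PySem

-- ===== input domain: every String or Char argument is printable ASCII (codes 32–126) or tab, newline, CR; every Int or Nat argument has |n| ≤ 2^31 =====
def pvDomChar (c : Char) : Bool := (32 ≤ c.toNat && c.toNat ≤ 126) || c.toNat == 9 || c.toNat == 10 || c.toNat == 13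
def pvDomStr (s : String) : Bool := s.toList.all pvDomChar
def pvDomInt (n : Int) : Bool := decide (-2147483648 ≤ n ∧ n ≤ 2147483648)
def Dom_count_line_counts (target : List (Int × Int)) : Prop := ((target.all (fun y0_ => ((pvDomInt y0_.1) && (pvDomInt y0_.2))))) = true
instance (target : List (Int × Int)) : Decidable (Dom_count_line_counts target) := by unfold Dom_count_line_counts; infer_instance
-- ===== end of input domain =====

-- B replaces A's hash-accumulation loop by an ordered dedup of the values followed by counting each; objective: simpler (return value only; no mutation involved).
-- ===== PORT A =====
-- literal port of A: dict accumulation, membership test then increment-or-insert; returned dict as items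
def count_line_counts (target : List (Int × Int)) : List (Int × Int) :=
  (target.foldl (fun d e =>
      if PySem.Dict.contains d e.2 then d.insert e.2 (d.getD e.2 0 + 1)
      else d.insert e.2 1)
    (PySem.Dict.empty : PySem.Dict Int Int)).items

-- ===== PORT B =====
-- port of B: ordered dedup (dict.fromkeys) of the values, then count each
def count_line_counts_alt (target : List (Int × Int)) : List (Int × Int) :=
  let vals := target.map (fun e => e.2)
  (PySem.List.dedup vals).map (fun v => (v, (vals.count v : Int)))

-- ===== PRECONDITION & SPEC =====
def Spec_count_line_counts (target : List (Int × Int)) (out : List (Int × Int)) : Prop := out = count_line_counts_alt target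
instance (target : List (Int × Int)) (out : List (Int × Int)) : Decidable (Spec_count_line_counts target out) := by unfold Spec_count_line_counts; infer_instance

-- ===== CLAIM (what is proved, stated in full; the proofs are below) =====
def Claim_equal_count_line_counts : Prop := ∀ (target : List (Int × Int)), Dom_count_line_counts target → Spec_count_line_counts target (count_line_counts target)

-- ===== LEMMAS AND PROOFS =====

-- A's increment-or-insert branch is one insert of (old count + 1): in the absent case the old count is 0
lemma step_eq (d : PySem.Dict Int Int) (x : Int) :
    (if PySem.Dict.contains d x then d.insert x (d.getD x 0 + 1) else d.insert x 1)
    = d.insert x (d.getD x 0 + 1) := by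
  split_ifs with h
  · rfl
  · simp only [PySem.Dict.contains_eq_decide_mem_keys, decide_eq_true_eq] at h
    have h0 : d.getD x 0 = 0 := by
      rw [PySem.Dict.getD_eq_get?_getD,
        (PySem.Dict.get?_eq_none_iff_not_mem_keys d x).mpr h]
      rfl
    rw [h0]; norm_num

-- ===== VERDICT (by name: the statement is the Claim_ definition above) =====
theorem count_line_counts_spec : Claim_equal_count_line_counts := by
  intro target _
  unfold Spec_count_line_counts count_line_counts count_line_counts_alt
  have h1 : target.foldl (fun d e =>
      if PySem.Dict.contains d e.2 then d.insert e.2 (d.getD e.2 0 + 1)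
      else d.insert e.2 1) (PySem.Dict.empty : PySem.Dict Int Int)
      = (target.map (fun e => e.2)).foldl
          (fun d x => d.insert x (d.getD x 0 + 1)) PySem.Dict.empty := by
    rw [List.foldl_map]
    exact List.foldl_ext _ _ _ (fun d e _ => step_eq d e.2)
  rw [h1, PySem.Dict.foldl_insert_getD_add_one_eq_counter, PySem.Dict.items_counter]
  simp [PySem.List.dedup_eq_ofList]
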